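-- pv_equiv track=rewrite | github.com/fip-lab/DESIGN | SELECT/script/dataProcess/preProcess.py | mergeSameRoleDialogues
-- ===== SOURCE A (Python) =====
-- def mergeSameRoleDialogues(message):
--     result = []
--     current = None
--
--     for entry in message:
--         if current and entry['senderWorkerId'] == current['senderWorkerId']:
--             current['text'] += ' ' + entry['text']
--         else:
--             if current:
--                 result.append({'senderWorkerId': current['senderWorkerId'], 'text': current['text']})
--             current = {'senderWorkerId': entry['senderWorkerId'], 'text': entry['text']}
--
--     # Append the last accumulated entry
--     if current:
--         result.append({'senderWorkerId': current['senderWorkerId'], 'text': current['text']})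
--     return result
-- ===== SOURCE B (Python) =====
-- def mergeSameRoleDialogues(message):
--     # Index-based run splitting: for each position i, scan forward to find the
--     # run boundary j of equal senderWorkerId, emit one merged entry for the run
--     # message[i:j] via ' '.join, and jump i to j. No state is carried between
--     # runs (A instead folds every entry into a running `current` accumulator).
--     result = []
--     i, n = 0, len(message)
--     while i < n:
--         k = message[i]['senderWorkerId']
--         j = i + 1
--         while j < n and message[j]['senderWorkerId'] == k:
--             j += 1
--         result.append({'senderWorkerId': k,
--                        'text': ' '.join(e['text'] for e in message[i:j])})
--         i = j
--     return result
-- ===== Notes on version B (the rewrite author's own statement) =====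
-- stated objective: alternative
-- what changed: Replaces A's single pass with a running current-dict accumulator (string += and emit-on-change) by index-based run splitting: an outer loop that scans forward for each run's boundary j, emits ' '.join over the slice message[i:j], and jumps to j, carrying no state between runs.
import Mathlib
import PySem

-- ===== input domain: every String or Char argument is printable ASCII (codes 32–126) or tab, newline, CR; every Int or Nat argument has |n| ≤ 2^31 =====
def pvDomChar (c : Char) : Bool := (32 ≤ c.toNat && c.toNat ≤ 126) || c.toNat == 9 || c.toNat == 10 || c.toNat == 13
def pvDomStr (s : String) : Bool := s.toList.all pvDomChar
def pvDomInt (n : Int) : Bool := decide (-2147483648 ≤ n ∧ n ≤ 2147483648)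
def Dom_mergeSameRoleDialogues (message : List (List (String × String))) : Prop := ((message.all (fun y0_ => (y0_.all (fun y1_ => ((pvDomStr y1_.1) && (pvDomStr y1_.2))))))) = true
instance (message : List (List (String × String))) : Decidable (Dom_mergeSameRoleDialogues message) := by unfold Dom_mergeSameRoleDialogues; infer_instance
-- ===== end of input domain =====

-- B replaces A's running current-dict accumulator with index-based run
-- splitting (find each run's boundary, ' '.join its slice, jump past it);
-- return values proved equal on all inputs whose entries carry both keys (Pre_).

-- ===== PORT A =====
-- first-match association lookup = Python's d[k] on a dict; "" stands for the
-- KeyError case, which Pre_ excludes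
def pvLk (d : List (String × String)) (k : String) : String :=
  match d with
  | [] => ""
  | (a, b) :: r => if a == k then b else pvLk r k

-- output dict literal {'senderWorkerId': s, 'text': t}
def pvMk (s t : String) : List (String × String) := [("senderWorkerId", s), ("text", t)]

-- A's for-loop over `message` with state (result, current)
def pvALoop (msgs : List (List (String × String))) (res : List (List (String × String)))
    (cur : Option (String × String)) : List (List (String × String)) :=
  match msgs with
  | [] =>
    match cur with
    | none => res
    | some (s, t) => res ++ [pvMk s t]
  | e :: rest =>
    match cur with
    | some (s, t) =>
      if pvLk e "senderWorkerId" == s then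
        pvALoop rest res (some (s, t ++ " " ++ pvLk e "text"))
      else
        pvALoop rest (res ++ [pvMk s t]) (some (pvLk e "senderWorkerId", pvLk e "text"))
    | none => pvALoop rest res (some (pvLk e "senderWorkerId", pvLk e "text"))

def mergeSameRoleDialogues (message : List (List (String × String))) : List (List (String × String)) :=
  pvALoop message [] none

-- ===== PORT B =====
-- B's outer while-loop keeps only the index i into the fixed list; in Lean the
-- suffix message[i:] is the recursion argument. The inner `while j < n and
-- message[j]['senderWorkerId'] == k: j += 1` boundary scan is the
-- takeWhile/dropWhile split of that suffix, and message[i:j] is e :: run.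
def mergeSameRoleDialogues_alt (message : List (List (String × String))) : List (List (String × String)) :=
  match message with
  | [] => []
  | e :: rest =>
    let k := pvLk e "senderWorkerId"
    let run := rest.takeWhile (fun x => pvLk x "senderWorkerId" == k)
    pvMk k (PySem.Str.join " " ((e :: run).map (fun x => pvLk x "text"))) ::
      mergeSameRoleDialogues_alt (rest.dropWhile (fun x => pvLk x "senderWorkerId" == k))
termination_by message.length
decreasing_by
  simp only [List.length_cons]
  exact Nat.lt_succ_of_le (List.length_dropWhile_le _ _)

-- ===== PRECONDITION & SPEC =====
-- Pre_ excludes exactly the inputs on which Python A raises KeyError: an entry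
-- missing the 'senderWorkerId' or 'text' key (B raises there too).
def Pre_mergeSameRoleDialogues (message : List (List (String × String))) : Prop :=
  ∀ e ∈ message, "senderWorkerId" ∈ e.map Prod.fst ∧ "text" ∈ e.map Prod.fst
instance (message : List (List (String × String))) : Decidable (Pre_mergeSameRoleDialogues message) := by unfold Pre_mergeSameRoleDialogues; infer_instance
def pvWitness_mergeSameRoleDialogues : (List (List (String × String))) :=
  [[("senderWorkerId", "a"), ("text", "hi")], [("senderWorkerId", "a"), ("text", "there")],
   [("senderWorkerId", "b"), ("text", "yo")]]

def Spec_mergeSameRoleDialogues (message : List (List (String × String))) (out : List (List (String × String))) : Prop := out = mergeSameRoleDialogues_alt message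
instance (message : List (List (String × String))) (out : List (List (String × String))) : Decidable (Spec_mergeSameRoleDialogues message out) := by unfold Spec_mergeSameRoleDialogues; infer_instance

-- ===== CLAIM (what is proved, stated in full; the proofs are below) =====
def Claim_equal_mergeSameRoleDialogues : Prop := ∀ (message : List (List (String × String))), Dom_mergeSameRoleDialogues message → Pre_mergeSameRoleDialogues message → Spec_mergeSameRoleDialogues message (mergeSameRoleDialogues message)

-- ===== LEMMAS AND PROOFS =====

-- ' '.join (t :: tr) equals A's repeated `+ ' ' +` accumulation
theorem pv_ofList_space (l : List Char) : String.ofList (' ' :: l) = " " ++ String.ofList l := by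
  have h : (' ' :: l) = [' '] ++ l := rfl
  rw [h, String.ofList_append]

theorem pv_join_shift (a b : String) (l : List String) :
    PySem.Str.join " " ((a ++ " " ++ b) :: l) = a ++ " " ++ PySem.Str.join " " (b :: l) := by
  cases l with
  | nil =>
    simp [PySem.Str.join, PySem.Chars.join_singleton, pv_ofList_space, String.append_assoc]
  | cons c cs =>
    have h : ∀ (b : String) (l : List Char), (b.toList ++ ' ' :: l) = b.toList ++ ([' '] ++ l) :=
      fun _ _ => rfl
    simp [PySem.Str.join, PySem.Chars.join_cons_cons, h, pv_ofList_space, String.ofList_append,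
      String.append_assoc]

theorem pv_join_cons (t x : String) (l : List String) :
    PySem.Str.join " " (t :: x :: l) = t ++ " " ++ PySem.Str.join " " (x :: l) := by
  have h : ∀ (l : List Char), (t.toList ++ ' ' :: l) = t.toList ++ ([' '] ++ l) := fun _ => rfl
  simp [PySem.Str.join, PySem.Chars.join_cons_cons, h, pv_ofList_space, String.ofList_append,
    String.append_assoc]

-- main invariant: A's loop with current = (s, text accumulated from ts) and
-- emitted prefix res equals res ++ B's recursion, with the pending texts ts
-- extended by the leading run of msgs with sender s.
theorem pv_inv (msgs : List (List (String × String))) :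
    ∀ (res : List (List (String × String))) (s t : String),
    pvALoop msgs res (some (s, t)) =
      res ++ pvMk s (PySem.Str.join " "
          (t :: (msgs.takeWhile (fun x => pvLk x "senderWorkerId" == s)).map
            (fun x => pvLk x "text"))) ::
        mergeSameRoleDialogues_alt (msgs.dropWhile (fun x => pvLk x "senderWorkerId" == s)) := by
  induction msgs with
  | nil =>
    intro res s t
    simp [pvALoop, mergeSameRoleDialogues_alt, PySem.Str.join, PySem.Chars.join_singleton]
  | cons e rest ih =>
    intro res s t
    by_cases h : pvLk e "senderWorkerId" == s
    · simp only [pvALoop, h, if_pos, List.takeWhile_cons, List.dropWhile_cons]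
      rw [ih res s (t ++ " " ++ pvLk e "text")]
      simp [List.map_cons, pv_join_shift, pv_join_cons]
    · simp only [pvALoop, h]
      rw [if_neg (by simp [h]), ih (res ++ [pvMk s t]) (pvLk e "senderWorkerId") (pvLk e "text")]
      have hA : (e :: rest).takeWhile (fun x => pvLk x "senderWorkerId" == s) = [] := by
        simp [h]
      have hB : (e :: rest).dropWhile (fun x => pvLk x "senderWorkerId" == s) = e :: rest := by
        simp [h]
      rw [hA, hB]
      conv_rhs => rw [mergeSameRoleDialogues_alt]
      simp [PySem.Str.join, PySem.Chars.join_singleton]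

-- ===== VERDICT (by name: the statement is the Claim_ definition above) =====
theorem mergeSameRoleDialogues_spec : Claim_equal_mergeSameRoleDialogues := by
  intro message _ _
  unfold Spec_mergeSameRoleDialogues mergeSameRoleDialogues
  cases message with
  | nil => simp [pvALoop, mergeSameRoleDialogues_alt]
  | cons e rest =>
    simp only [pvALoop]
    rw [pv_inv rest [] (pvLk e "senderWorkerId") (pvLk e "text")]
    conv_rhs => rw [mergeSameRoleDialogues_alt]
    simp
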